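-- pv_equiv track=rewrite | github.com/AlexN235/CMPT-417---Intellegent-Systems | code/mvc.py | combine_connected
-- ===== SOURCE A (Python) =====
-- def combine_connected(graphConnection):
--     """
--     Combines any list that share the same values (vertex). Only one combination per
--     function call.
--     i.e [[0,1], [1,0], [2,3,4], [3,2,4], [4,2,3]] => [[0,1], [2,3,4], [3,2,4], [4,2,3]]
--     """
--     newConnection = graphConnection.copy()
--     for out_i, outer in enumerate(graphConnection):
--         for in_i, inner in enumerate(graphConnection):
--             if out_i >= in_i:
--                 continue
--             for connect in inner:
--                 if connect in outer:
--                     inOuterNotInner = set(outer) - set(inner)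
--                     combined = list(inner) + list(inOuterNotInner)
--                     del newConnection[in_i]
--                     del newConnection[out_i]
--                     newConnection.append(combined)
--                     return newConnection
-- ===== SOURCE B (Python) =====
-- def combine_connected(graphConnection):
--     """Merge the first (lexicographically smallest (i, j)) pair of lists that
--     share a vertex: a single pass with a value -> first-list-index map
--     instead of nested pairwise scans."""
--     firstIdx = {}
--     best = None  # lexicographically smallest sharing pair (i, j)
--     for j, lst in enumerate(graphConnection):
--         m = None
--         for v in lst:
--             i = firstIdx.get(v)
--             if i is not None and (m is None or i < m):
--                 m = i
--         if m is not None and (best is None or m < best[0]):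
--             best = (m, j)
--         for v in lst:
--             if v not in firstIdx:
--                 firstIdx[v] = j
--     if best is None:
--         return None
--     i, j = best
--     outer, inner = graphConnection[i], graphConnection[j]
--     diff = [v for v in dict.fromkeys(outer) if v not in inner]
--     kept = [l for k, l in enumerate(graphConnection) if k != i and k != j]
--     kept.append(list(inner) + diff)
--     return kept
-- ===== Notes on version B (the rewrite author's own statement) =====
-- stated objective: alternative
-- what changed: Replaces A's triple nested scan over all ordered list pairs with a single pass that indexes each vertex to the first list containing it and finds the lexicographically first sharing pair via dictionary lookups, building the merged entry by order-preserving dedup-filter instead of Python set difference.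
-- outside the precondition, e.g. on combine_connected([[2, 1, 0], [5, 2]]): A returns [[5, 2, 0, 1]], B returns [[5, 2, 1, 0]]
import Mathlib
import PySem

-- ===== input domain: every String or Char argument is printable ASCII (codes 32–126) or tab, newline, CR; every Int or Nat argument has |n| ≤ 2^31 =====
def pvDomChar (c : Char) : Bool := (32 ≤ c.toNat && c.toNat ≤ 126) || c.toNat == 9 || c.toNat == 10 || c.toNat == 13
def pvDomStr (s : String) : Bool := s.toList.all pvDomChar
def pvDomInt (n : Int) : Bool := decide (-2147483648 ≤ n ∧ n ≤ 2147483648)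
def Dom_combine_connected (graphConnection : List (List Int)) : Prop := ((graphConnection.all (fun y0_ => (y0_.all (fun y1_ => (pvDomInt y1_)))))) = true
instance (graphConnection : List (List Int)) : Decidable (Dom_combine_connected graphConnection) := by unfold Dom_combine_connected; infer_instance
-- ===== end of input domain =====

-- B replaces A's nested pairwise scans by one pass with a vertex -> first-list-index map
-- (a different algorithm; its speed on large inputs is not claimed, since those lie outside Pre_).

-- ===== PORT A =====
-- 'for connect in inner: if connect in outer: …' — A's innermost membership loop
def shareRow (outer inner : List Int) : Bool := inner.any (fun c => outer.contains c)

-- A's 'for in_i, inner in enumerate(graphConnection)' loop, returning the first hit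
def pyAInner (outer : List Int) (out_i : Int) : List (Int × List Int) → Option (Int × List Int)
  | [] => none
  | (in_i, inner) :: rest =>
    if out_i ≥ in_i then pyAInner outer out_i rest
    else if shareRow outer inner then some (in_i, inner)
    else pyAInner outer out_i rest

-- A's 'for out_i, outer in enumerate(graphConnection)' loop
def pyAOuter (g : List (List Int)) : List (Int × List Int) → Option (Int × List Int × Int × List Int)
  | [] => none
  | (out_i, outer) :: rest =>
    match pyAInner outer out_i (PySem.List.enumerate g 0) with
    | some (in_i, inner) => some (out_i, outer, in_i, inner)
    | none => pyAOuter g rest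

def combine_connected (graphConnection : List (List Int)) : Option (List (List Int)) :=
  match pyAOuter graphConnection (PySem.List.enumerate graphConnection 0) with
  | none => none
  | some (out_i, outer, in_i, inner) =>
    -- list(set(outer) - set(inner)): CPython's set iteration order is not modelled by PySem;
    -- this port lists the difference in ascending order, exact under Pre_ (≤ 1 element there)
    let inOuterNotInner :=
      PySem.List.sorted (PySem.Set.diff (PySem.Set.ofList outer) (PySem.Set.ofList inner))
        (fun x => x) false
    some (((graphConnection.eraseIdx in_i.toNat).eraseIdx out_i.toNat) ++ [inner ++ inOuterNotInner])

-- ===== PORT B =====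
-- 'i = firstIdx.get(v); if i is not None and (m is None or i < m): m = i'
def bStep (d : PySem.Dict Int Int) (m : Option Int) (v : Int) : Option Int :=
  match d.get? v with
  | some i =>
    match m with
    | none => some i
    | some mm => if i < mm then some i else some mm
  | none => m

def bRowMin (d : PySem.Dict Int Int) (xs : List Int) : Option Int := xs.foldl (bStep d) none

-- 'for v in lst: if v not in firstIdx: firstIdx[v] = j'
def bAddRow (d : PySem.Dict Int Int) (j : Int) (xs : List Int) : PySem.Dict Int Int :=
  xs.foldl (fun d v => if d.contains v then d else d.insert v j) d

-- B's main 'for j, lst in enumerate(graphConnection)' loop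
def bScan : PySem.Dict Int Int → Option (Int × Int) → Int → List (List Int) → Option (Int × Int)
  | _, best, _, [] => best
  | d, best, j, xs :: rest =>
    let best' :=
      match bRowMin d xs with
      | none => best
      | some m =>
        match best with
        | none => some (m, j)
        | some (bi, _) => if m < bi then some (m, j) else best
    bScan (bAddRow d j xs) best' (j + 1) rest

def combine_connected_alt (graphConnection : List (List Int)) : Option (List (List Int)) :=
  match bScan PySem.Dict.empty none 0 graphConnection with
  | none => none
  | some (i, j) =>
    let outer := PySem.List.pyGetD graphConnection i []
    let inner := PySem.List.pyGetD graphConnection j []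
    let diff := (PySem.List.dedup outer).filter (fun v => !inner.contains v)
    let kept := ((PySem.List.enumerate graphConnection 0).filter
                   (fun p => p.1 != i && p.1 != j)).map (·.2)
    some (kept ++ [inner ++ diff])

-- ===== PRECONDITION & SPEC =====
-- Pre_ excludes inputs where some sharing pair of lists leaves ≥ 2 distinct outer-only vertices:
-- there A would list those vertices in CPython set-iteration order, an accidental order PySem does
-- not model (on some such inputs that order coincides with B's first-occurrence order, but the
-- coincidence is accidental, so all of them are excluded).
def Pre_combine_connected (graphConnection : List (List Int)) : Prop :=
  ∀ p ∈ PySem.List.enumerate graphConnection 0, ∀ q ∈ PySem.List.enumerate graphConnection 0,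
    p.1 < q.1 → shareRow p.2 q.2 = true →
      ((PySem.List.dedup p.2).filter (fun v => !q.2.contains v)).length ≤ 1
instance (graphConnection : List (List Int)) : Decidable (Pre_combine_connected graphConnection) := by
  unfold Pre_combine_connected; infer_instance

def pvWitness_combine_connected : List (List Int) := [[0, 1], [1, 2], [5]]

def Spec_combine_connected (graphConnection : List (List Int)) (out : Option (List (List Int))) : Prop := out = combine_connected_alt graphConnection
instance (graphConnection : List (List Int)) (out : Option (List (List Int))) : Decidable (Spec_combine_connected graphConnection out) := by unfold Spec_combine_connected; infer_instance

-- ===== CLAIM (what is proved, stated in full; the proofs are below) =====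
def Claim_equal_combine_connected : Prop := ∀ (graphConnection : List (List Int)), Dom_combine_connected graphConnection → Pre_combine_connected graphConnection → Spec_combine_connected graphConnection (combine_connected graphConnection)

-- ===== LEMMAS AND PROOFS =====

-- (i, j) is a sharing pair: both indices in range, i < j, and list j shares a vertex with list i
def SPidx (g : List (List Int)) (i j : Int) : Prop :=
  0 ≤ i ∧ i < j ∧ j < (g.length : Int) ∧
    shareRow (PySem.List.pyGetD g i []) (PySem.List.pyGetD g j []) = true

-- r is the lexicographically least sharing pair (none iff there is none)
def IsBest (g : List (List Int)) (r : Option (Int × Int)) : Prop :=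
  match r with
  | none => ∀ i j, ¬ SPidx g i j
  | some (i, j) => SPidx g i j ∧ ∀ i' j', SPidx g i' j' → (i < i' ∨ (i = i' ∧ j ≤ j'))

theorem spidx_nat (g : List (List Int)) (a b : Nat) (ha : a < g.length) (hb : b < g.length)
    (hab : a < b) (hs : shareRow g[a] g[b] = true) : SPidx g (a : Int) (b : Int) := by
  refine ⟨by omega, by exact_mod_cast hab, by exact_mod_cast hb, ?_⟩
  rwa [PySem.List.pyGetD_ofNat g a [] ha, PySem.List.pyGetD_ofNat g b [] hb]

theorem spidx_elim (g : List (List Int)) (i j : Int) (h : SPidx g i j) :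
    ∃ (a b : Nat), a < g.length ∧ b < g.length ∧ i = (a : Int) ∧ j = (b : Int) ∧ a < b ∧
      shareRow g[a]! g[b]! = true := by
  obtain ⟨h0, hij, hjn, hs⟩ := h
  have ha : i.toNat < g.length := by omega
  have hb : j.toNat < g.length := by omega
  refine ⟨i.toNat, j.toNat, ha, hb, by omega, by omega, by omega, ?_⟩
  rw [getElem!_pos g i.toNat ha, getElem!_pos g j.toNat hb]
  rwa [show i = ((i.toNat : Nat) : Int) by omega, show j = ((j.toNat : Nat) : Int) by omega,
    PySem.List.pyGetD_ofNat g i.toNat [] ha, PySem.List.pyGetD_ofNat g j.toNat [] hb] at hs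

theorem isBest_unique (g : List (List Int)) (r r' : Option (Int × Int))
    (h : IsBest g r) (h' : IsBest g r') : r = r' := by
  match r, r' with
  | none, none => rfl
  | none, some (i, j) => exact absurd h'.1 (h i j)
  | some (i, j), none => exact absurd h.1 (h' i j)
  | some (i, j), some (i', j') =>
    have m1 := h.2 i' j' h'.1
    have m2 := h'.2 i j h.1
    have : i = i' ∧ j = j' := by omega
    simp [this.1, this.2]

-- membership in the enumeration, bridged to absolute indices
theorem mem_E_iff (g : List (List Int)) (p : Int × List Int) :
    p ∈ PySem.List.enumerate g 0 ↔ ∃ (k : Nat), ∃ (_ : k < g.length), p = ((k : Int), g[k]) := by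
  constructor
  · intro h
    rw [PySem.List.mem_enumerate_iff] at h
    obtain ⟨k, hk, rfl⟩ := h
    exact ⟨k, hk, by simp⟩
  · rintro ⟨k, hk, rfl⟩
    rw [PySem.List.mem_enumerate_iff]
    exact ⟨k, hk, by simp⟩

theorem mem_E_fst_inj (g : List (List Int)) {p q : Int × List Int}
    (hp : p ∈ PySem.List.enumerate g 0) (hq : q ∈ PySem.List.enumerate g 0) (h : p.1 = q.1) :
    p = q := by
  rw [mem_E_iff] at hp hq
  obtain ⟨k, hk, rfl⟩ := hp
  obtain ⟨k', hk', rfl⟩ := hq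
  simp only [Prod.mk.injEq] at h ⊢
  have : k = k' := by exact_mod_cast h
  subst this; simp

theorem enum_fst_ge (g : List (List Int)) (s : Int) (p : Int × List Int)
    (hp : p ∈ PySem.List.enumerate g s) : s ≤ p.1 := by
  rw [PySem.List.mem_enumerate_iff] at hp
  obtain ⟨k, hk, rfl⟩ := hp
  simp

-- ---------- A side ----------

theorem pyAInner_eq_find? (outer : List Int) (oi : Int) (l : List (Int × List Int)) :
    pyAInner outer oi l = l.find? (fun q => decide (oi < q.1) && shareRow outer q.2) := by
  induction l with
  | nil => rfl
  | cons h t ih =>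
    obtain ⟨ii, inner⟩ := h
    by_cases hge : oi ≥ ii
    · have hnl : ¬ oi < ii := not_lt.mpr hge
      simp [pyAInner, hge, hnl, ih]
    · have hl : oi < ii := lt_of_not_ge hge
      by_cases hs : shareRow outer inner = true
      · simp [pyAInner, hge, hl, hs]
      · simp [pyAInner, hge, hl, hs, ih]

theorem find?_min {α : Type} (pred : Int × α → Bool) :
    ∀ (l : List (Int × α)), l.Pairwise (fun a b => a.1 < b.1) → ∀ q, l.find? pred = some q →
      ∀ q' ∈ l, pred q' = true → q.1 ≤ q'.1 := by
  intro l
  induction l with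
  | nil => intro _ q h; simp at h
  | cons h t ih =>
    intro hpw q hf q' hq' hpq'
    rw [List.pairwise_cons] at hpw
    by_cases hph : pred h = true
    · rw [List.find?_cons_of_pos hph] at hf
      cases hf
      rcases List.mem_cons.mp hq' with rfl | hq't
      · exact le_refl _
      · exact le_of_lt (hpw.1 q' hq't)
    · rw [List.find?_cons_of_neg hph] at hf
      rcases List.mem_cons.mp hq' with rfl | hq't
      · exact absurd hpq' hph
      · exact ih hpw.2 q hf q' hq't hpq'

theorem pyAOuter_props (g : List (List Int)) :
    ∀ (l : List (Int × List Int)), l.Pairwise (fun a b => a.1 < b.1) →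
      (pyAOuter g l = none → ∀ p ∈ l, pyAInner p.2 p.1 (PySem.List.enumerate g 0) = none) ∧
      (∀ oi outer ii inner, pyAOuter g l = some (oi, outer, ii, inner) →
        (oi, outer) ∈ l ∧ pyAInner outer oi (PySem.List.enumerate g 0) = some (ii, inner) ∧
        ∀ p ∈ l, pyAInner p.2 p.1 (PySem.List.enumerate g 0) ≠ none → oi ≤ p.1) := by
  intro l
  induction l with
  | nil =>
    intro _
    constructor
    · intro _ p hp; simp at hp
    · intro oi outer ii inner h; simp [pyAOuter] at h
  | cons h t ih =>
    intro hpw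
    rw [List.pairwise_cons] at hpw
    obtain ⟨ihn, ihs⟩ := ih hpw.2
    obtain ⟨hi, hrow⟩ := h
    constructor
    · intro hnone p hp
      cases hfind : pyAInner hrow hi (PySem.List.enumerate g 0) with
      | some v => simp [pyAOuter, hfind] at hnone
      | none =>
        rcases List.mem_cons.mp hp with rfl | hpt
        · exact hfind
        · exact ihn (by simpa [pyAOuter, hfind] using hnone) p hpt
    · intro oi outer ii inner hsome
      cases hfind : pyAInner hrow hi (PySem.List.enumerate g 0) with
      | some v =>
        simp [pyAOuter, hfind] at hsome
        obtain ⟨rfl, rfl, hv⟩ := hsome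
        refine ⟨List.mem_cons_self .., by rw [hfind, hv], ?_⟩
        intro p hp _
        rcases List.mem_cons.mp hp with rfl | hpt
        · exact le_refl _
        · exact le_of_lt (hpw.1 p hpt)
      | none =>
        have hsome' : pyAOuter g t = some (oi, outer, ii, inner) := by
          simpa [pyAOuter, hfind] using hsome
        obtain ⟨hmem, hfd, hmin⟩ := ihs oi outer ii inner hsome'
        refine ⟨List.mem_cons_of_mem _ hmem, hfd, ?_⟩
        intro p hp hpne
        rcases List.mem_cons.mp hp with rfl | hpt
        · exact absurd hfind hpne
        · exact hmin p hpt hpne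

theorem shareRow_witness (o i : List Int) (v : Int) (hvi : v ∈ i) (hvo : v ∈ o) :
    shareRow o i = true := by
  simp only [shareRow, List.any_eq_true]
  exact ⟨v, hvi, by simpa [List.contains_iff_mem] using hvo⟩

theorem shareRow_elim (o i : List Int) (h : shareRow o i = true) : ∃ v, v ∈ i ∧ v ∈ o := by
  simp only [shareRow, List.any_eq_true] at h
  obtain ⟨v, hvi, hvo⟩ := h
  exact ⟨v, hvi, by simpa [List.contains_iff_mem] using hvo⟩

theorem aSide_isBest (g : List (List Int)) :
    IsBest g ((pyAOuter g (PySem.List.enumerate g 0)).map (fun t => (t.1, t.2.2.1))) := by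
  have hpw := PySem.List.pairwise_lt_enumerate (xs := g) (s := 0)
  obtain ⟨hn, hs⟩ := pyAOuter_props g (PySem.List.enumerate g 0) hpw
  cases hO : pyAOuter g (PySem.List.enumerate g 0) with
  | none =>
    simp only [Option.map_none]
    intro i j hsp
    obtain ⟨a, b, ha, hb, rfl, rfl, hab, hshare⟩ := spidx_elim g _ _ hsp
    have hpa : ((a : Int), g[a]) ∈ PySem.List.enumerate g 0 := (mem_E_iff g _).mpr ⟨a, ha, rfl⟩
    have hqb : ((b : Int), g[b]) ∈ PySem.List.enumerate g 0 := (mem_E_iff g _).mpr ⟨b, hb, rfl⟩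
    have hnone := hn hO _ hpa
    rw [pyAInner_eq_find?] at hnone
    have hfq := List.find?_eq_none.mp hnone _ hqb
    rw [getElem!_pos g a ha, getElem!_pos g b hb] at hshare
    simp at hfq
    have hff := hfq (by exact_mod_cast hab)
    simp [hshare] at hff
  | some t =>
    obtain ⟨oi, outer, ii, inner⟩ := t
    obtain ⟨hmem, hfd, hmin⟩ := hs oi outer ii inner hO
    have hfd' := hfd
    rw [pyAInner_eq_find?] at hfd'
    have hqmem : (ii, inner) ∈ PySem.List.enumerate g 0 := List.mem_of_find?_eq_some hfd'
    have hpred := List.find?_some hfd'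
    simp only [Bool.and_eq_true, decide_eq_true_eq] at hpred
    obtain ⟨a, ha, hpa⟩ := (mem_E_iff g _).mp hmem
    obtain ⟨b, hb, hqb⟩ := (mem_E_iff g _).mp hqmem
    have hoi : oi = (a : Int) := congrArg Prod.fst hpa
    have houter : outer = g[a] := congrArg Prod.snd hpa
    have hii : ii = (b : Int) := congrArg Prod.fst hqb
    have hinner : inner = g[b] := congrArg Prod.snd hqb
    simp only [Option.map_some]
    constructor
    · rw [hoi, hii]
      exact spidx_nat g a b ha hb (by rw [hoi, hii] at hpred; exact_mod_cast hpred.1)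
        (by rw [houter, hinner] at hpred; exact hpred.2)
    · intro i' j' hsp'
      obtain ⟨a', b', ha', hb', rfl, rfl, hab', hshare'⟩ := spidx_elim g _ _ hsp'
      rw [getElem!_pos g a' ha', getElem!_pos g b' hb'] at hshare'
      have hpa' : ((a' : Int), g[a']) ∈ PySem.List.enumerate g 0 := (mem_E_iff g _).mpr ⟨a', ha', rfl⟩
      have hqb' : ((b' : Int), g[b']) ∈ PySem.List.enumerate g 0 := (mem_E_iff g _).mpr ⟨b', hb', rfl⟩
      have hne : pyAInner g[a'] (a' : Int) (PySem.List.enumerate g 0) ≠ none := by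
        rw [pyAInner_eq_find?]
        intro hcon
        have hfq := List.find?_eq_none.mp hcon _ hqb'
        simp at hfq
        have hff := hfq (by exact_mod_cast hab')
        simp [hshare'] at hff
      have hle : oi ≤ (a' : Int) := hmin ((a' : Int), g[a']) hpa' hne
      by_cases heq : oi = (a' : Int)
      · right
        refine ⟨heq, ?_⟩
        have hpp : ((oi, outer) : Int × List Int) = ((a' : Int), g[a']) :=
          mem_E_fst_inj g hmem hpa' heq
        have houter' : outer = g[a'] := congrArg Prod.snd hpp
        have hpred' : (fun (q : Int × List Int) => decide (oi < q.1) && shareRow outer q.2)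
            ((b' : Int), g[b']) = true := by
          have hlt : oi < (b' : Int) := by rw [heq]; exact_mod_cast hab'
          simp [hlt, houter', hshare']
        exact find?_min _ _ hpw _ hfd' _ hqb' hpred'
      · left
        omega

-- ---------- B side ----------

-- index of the first list (counting from s) containing v
def firstAt : List (List Int) → Int → Int → Option Int
  | [], _, _ => none
  | xs :: rest, s, v => if xs.contains v then some s else firstAt rest (s + 1) v

theorem firstAt_cons (x : List Int) (rest : List (List Int)) (s v : Int) :
    firstAt (x :: rest) s v = if x.contains v then some s else firstAt rest (s + 1) v := rfl

theorem firstAt_some : ∀ (pre : List (List Int)) (s v i : Int), firstAt pre s v = some i →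
    ∃ (k : Nat), ∃ (_ : k < pre.length), i = s + k ∧ pre[k].contains v = true := by
  intro pre
  induction pre with
  | nil => intro s v i h; simp [firstAt] at h
  | cons x rest ih =>
    intro s v i h
    rw [firstAt_cons] at h
    by_cases hx : x.contains v = true
    · rw [if_pos hx] at h
      have hsi : s = i := by injection h
      exact ⟨0, by simp, by omega, by simpa using hx⟩
    · rw [if_neg hx] at h
      obtain ⟨k, hk, hik, hc⟩ := ih (s + 1) v i h
      exact ⟨k + 1, by simpa using hk, by push_cast; omega, by simpa using hc⟩

theorem firstAt_le : ∀ (pre : List (List Int)) (s v : Int) (k : Nat), k < pre.length →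
    pre[k]!.contains v = true → ∃ i₀, firstAt pre s v = some i₀ ∧ i₀ ≤ s + k := by
  intro pre
  induction pre with
  | nil => intro s v k hk; simp at hk
  | cons x rest ih =>
    intro s v k hk hc
    by_cases hx : x.contains v = true
    · exact ⟨s, by rw [firstAt_cons, if_pos hx], by omega⟩
    · cases k with
      | zero =>
        rw [getElem!_pos _ 0 hk] at hc
        exact absurd hc hx
      | succ k' =>
        have hk' : k' < rest.length := by simpa using hk
        have hc' : rest[k']!.contains v = true := by
          rw [getElem!_pos _ (k' + 1) hk] at hc
          rw [getElem!_pos _ k' hk']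
          simpa using hc
        obtain ⟨i₀, h1, h2⟩ := ih (s + 1) v k' hk' hc'
        refine ⟨i₀, by rw [firstAt_cons, if_neg hx]; exact h1, by push_cast; omega⟩

theorem firstAt_append_some : ∀ (pre : List (List Int)) (xs : List Int) (s v i : Int),
    firstAt pre s v = some i → firstAt (pre ++ [xs]) s v = some i := by
  intro pre
  induction pre with
  | nil => intro xs s v i h; simp [firstAt] at h
  | cons x rest ih =>
    intro xs s v i h
    rw [firstAt_cons] at h
    rw [List.cons_append, firstAt_cons]
    by_cases hx : x.contains v = true
    · rw [if_pos hx] at h ⊢; exact h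
    · rw [if_neg hx] at h ⊢; exact ih xs (s + 1) v i h

theorem firstAt_append_none : ∀ (pre : List (List Int)) (xs : List Int) (s v : Int),
    firstAt pre s v = none →
    firstAt (pre ++ [xs]) s v = if xs.contains v then some (s + (pre.length : Int)) else none := by
  intro pre
  induction pre with
  | nil =>
    intro xs s v _
    rw [List.nil_append, firstAt_cons]
    simp [firstAt]
  | cons x rest ih =>
    intro xs s v h
    rw [firstAt_cons] at h
    by_cases hx : x.contains v = true
    · rw [if_pos hx] at h; simp at h
    · rw [if_neg hx] at h
      rw [List.cons_append, firstAt_cons, if_neg hx, ih xs (s + 1) v h]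
      have hc : s + 1 + (rest.length : Int) = s + ((x :: rest).length : Int) := by
        push_cast [List.length_cons]
        omega
      rw [hc]

theorem bAddRow_get (j v : Int) : ∀ (xs : List Int) (d : PySem.Dict Int Int),
    (bAddRow d j xs).get? v = (d.get? v).or (if xs.contains v then some j else none) := by
  intro xs
  induction xs with
  | nil =>
    intro d; simp [bAddRow]
  | cons u xs' ih =>
    intro d
    have hstep : bAddRow d j (u :: xs') = bAddRow (if d.contains u then d else d.insert u j) j xs' := by
      simp [bAddRow]
    rw [hstep]
    by_cases hc : d.contains u = true
    · rw [if_pos hc, ih d]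
      by_cases hvu : v = u
      · subst hvu
        have hisSome : (d.get? v).isSome := by rw [← PySem.Dict.contains_eq_isSome_get?]; exact hc
        cases hg : d.get? v with
        | none => rw [hg] at hisSome; simp at hisSome
        | some w => simp
      · have hcc : (u :: xs').contains v = xs'.contains v := by
          rw [List.contains_cons, beq_false_of_ne hvu, Bool.false_or]
        rw [hcc]
    · rw [if_neg hc, ih (d.insert u j)]
      by_cases hvu : v = u
      · subst hvu
        have hnone : d.get? v = none := by
          cases hg : d.get? v with
          | none => rfl
          | some w =>
            exfalso; apply hc
            rw [PySem.Dict.contains_eq_isSome_get?, hg]; rfl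
        rw [PySem.Dict.get?_insert, if_pos rfl, hnone]
        have hct : (v :: xs').contains v = true := by
          rw [List.contains_cons]
          simp
        rw [hct]
        simp
      · rw [PySem.Dict.get?_insert, if_neg hvu]
        have hcc : (u :: xs').contains v = xs'.contains v := by
          rw [List.contains_cons, beq_false_of_ne hvu, Bool.false_or]
        rw [hcc]

theorem rowMin_aux (d : PySem.Dict Int Int) : ∀ (xs : List Int) (acc : Option Int),
    (xs.foldl (bStep d) acc = none → acc = none ∧ ∀ v ∈ xs, d.get? v = none) ∧
    (∀ m, xs.foldl (bStep d) acc = some m →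
      (acc = some m ∨ ∃ v ∈ xs, d.get? v = some m) ∧
      (∀ mm, acc = some mm → m ≤ mm) ∧
      (∀ v ∈ xs, ∀ i, d.get? v = some i → m ≤ i)) := by
  intro xs
  induction xs with
  | nil =>
    intro acc
    constructor
    · intro h; exact ⟨by simpa using h, by simp⟩
    · intro m h
      simp only [List.foldl_nil] at h
      refine ⟨Or.inl h, ?_, by simp⟩
      intro mm hmm
      rw [h] at hmm
      have : m = mm := by injection hmm
      omega
  | cons v xs' ih =>
    intro acc
    have hfold : (v :: xs').foldl (bStep d) acc = xs'.foldl (bStep d) (bStep d acc v) := by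
      simp [List.foldl_cons]
    obtain ⟨ih1, ih2⟩ := ih (bStep d acc v)
    constructor
    · intro h
      rw [hfold] at h
      obtain ⟨h1, h2⟩ := ih1 h
      cases hdv : d.get? v with
      | some i =>
        exfalso
        cases acc with
        | none => simp [bStep, hdv] at h1
        | some mm => simp [bStep, hdv] at h1; split at h1 <;> simp at h1
      | none =>
        cases acc with
        | none =>
          refine ⟨rfl, ?_⟩
          intro u hu
          rcases List.mem_cons.mp hu with rfl | hu
          · exact hdv
          · exact h2 u hu
        | some mm => simp [bStep, hdv] at h1
    · intro m h
      rw [hfold] at h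
      obtain ⟨c1, c2, c3⟩ := ih2 m h
      cases hdv : d.get? v with
      | none =>
        have hb : bStep d acc v = acc := by simp [bStep, hdv]
        rw [hb] at c1 c2
        refine ⟨?_, c2, ?_⟩
        · rcases c1 with h' | ⟨u, hu, hdu⟩
          · exact Or.inl h'
          · exact Or.inr ⟨u, List.mem_cons_of_mem _ hu, hdu⟩
        · intro u hu i hdi
          rcases List.mem_cons.mp hu with rfl | hu
          · rw [hdv] at hdi; exact absurd hdi (by simp)
          · exact c3 u hu i hdi
      | some i =>
        cases acc with
        | none =>
          have hb : bStep d none v = some i := by simp [bStep, hdv]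
          rw [hb] at c1 c2
          have hmi : m ≤ i := c2 i rfl
          refine ⟨?_, by intro mm hmm; simp at hmm, ?_⟩
          · rcases c1 with h' | ⟨u, hu, hdu⟩
            · refine Or.inr ⟨v, List.mem_cons_self .., ?_⟩
              rw [hdv]
              exact h'
            · exact Or.inr ⟨u, List.mem_cons_of_mem _ hu, hdu⟩
          · intro u hu i' hdi'
            rcases List.mem_cons.mp hu with rfl | hu
            · rw [hdv] at hdi'
              have : i = i' := by injection hdi'
              omega
            · exact c3 u hu i' hdi'
        | some mm =>
          by_cases hlt : i < mm
          · have hb : bStep d (some mm) v = some i := by simp [bStep, hdv, hlt]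
            rw [hb] at c1 c2
            have hmi : m ≤ i := c2 i rfl
            refine ⟨?_, ?_, ?_⟩
            · rcases c1 with h' | ⟨u, hu, hdu⟩
              · refine Or.inr ⟨v, List.mem_cons_self .., ?_⟩
                rw [hdv]
                exact h'
              · exact Or.inr ⟨u, List.mem_cons_of_mem _ hu, hdu⟩
            · intro mm' hmm'
              have : mm = mm' := by injection hmm'
              omega
            · intro u hu i' hdi'
              rcases List.mem_cons.mp hu with rfl | hu
              · rw [hdv] at hdi'
                have : i = i' := by injection hdi'
                omega
              · exact c3 u hu i' hdi'
          · have hb : bStep d (some mm) v = some mm := by simp [bStep, hdv, hlt]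
            rw [hb] at c1 c2
            have hmm : m ≤ mm := c2 mm rfl
            refine ⟨?_, ?_, ?_⟩
            · rcases c1 with h' | ⟨u, hu, hdu⟩
              · exact Or.inl h'
              · exact Or.inr ⟨u, List.mem_cons_of_mem _ hu, hdu⟩
            · intro mm' hmm'
              have : mm = mm' := by injection hmm'
              omega
            · intro u hu i' hdi'
              rcases List.mem_cons.mp hu with rfl | hu
              · rw [hdv] at hdi'
                have : i = i' := by injection hdi'
                omega
              · exact c3 u hu i' hdi'

theorem rowMin_none (d : PySem.Dict Int Int) (xs : List Int) (h : bRowMin d xs = none) :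
    ∀ v ∈ xs, d.get? v = none := ((rowMin_aux d xs none).1 h).2

theorem rowMin_some (d : PySem.Dict Int Int) (xs : List Int) (m : Int) (h : bRowMin d xs = some m) :
    (∃ v ∈ xs, d.get? v = some m) ∧ ∀ v ∈ xs, ∀ i, d.get? v = some i → m ≤ i := by
  obtain ⟨c1, _, c3⟩ := (rowMin_aux d xs none).2 m h
  exact ⟨c1.resolve_left (by simp), c3⟩

-- invariant: best is the lexicographically least sharing pair among those with column < n
def BInv (g : List (List Int)) (n : Nat) (best : Option (Int × Int)) : Prop :=
  match best with
  | none => ∀ i j, j < (n : Int) → ¬ SPidx g i j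
  | some (bi, bj) =>
    SPidx g bi bj ∧ bj < (n : Int) ∧
      ∀ i' j', j' < (n : Int) → SPidx g i' j' → bi < i' ∨ (bi = i' ∧ bj ≤ j')

theorem bScan_ind (g : List (List Int)) : ∀ (rest pre : List (List Int))
    (d : PySem.Dict Int Int) (best : Option (Int × Int)),
    g = pre ++ rest →
    (∀ v, d.get? v = firstAt pre 0 v) →
    BInv g pre.length best →
    IsBest g (bScan d best ((pre.length : Nat) : Int) rest) := by
  intro rest
  induction rest with
  | nil =>
    intro pre d best hg hd hinv
    subst hg
    rw [bScan]
    have hlen : (pre ++ ([] : List (List Int))).length = pre.length := by simp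
    cases best with
    | none =>
      intro i j hsp
      have hj := hsp.2.2.1
      rw [hlen] at hj
      exact hinv i j hj hsp
    | some bij =>
      obtain ⟨bi, bj⟩ := bij
      refine ⟨hinv.1, ?_⟩
      intro i' j' hsp'
      have hj' := hsp'.2.2.1
      rw [hlen] at hj'
      exact hinv.2.2 i' j' hj' hsp'
  | cons xs rest' ih =>
    intro pre d best hg hd hinv
    subst hg
    have hg' : pre ++ xs :: rest' = (pre ++ [xs]) ++ rest' := by simp
    have hnlt : pre.length < (pre ++ xs :: rest').length := by simp
    have hgn : (pre ++ xs :: rest')[pre.length]'hnlt = xs := by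
      rw [List.getElem_append_right (le_refl pre.length)]
      simp
    have hpre_get : ∀ (k : Nat) (hk : k < pre.length),
        (pre ++ xs :: rest')[k]'(by simp; omega) = pre[k] := by
      intro k hk
      exact List.getElem_append_left hk
    have hlen1 : (((pre ++ [xs]).length : Nat) : Int) = ((pre.length : Nat) : Int) + 1 := by
      simp
    -- F1: a row minimum is a sharing pair with column pre.length
    have F1 : ∀ m, bRowMin d xs = some m → SPidx (pre ++ xs :: rest') m (pre.length : Int) := by
      intro m hm
      obtain ⟨⟨v, hvxs, hdv⟩, _⟩ := rowMin_some d xs m hm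
      rw [hd v] at hdv
      obtain ⟨k, hk, hik, hc⟩ := firstAt_some pre 0 v m hdv
      have hm_eq : m = (k : Int) := by omega
      subst hm_eq
      have hkg : k < (pre ++ xs :: rest').length := by simp; omega
      have hshare : shareRow (pre ++ xs :: rest')[k] (pre ++ xs :: rest')[pre.length] = true := by
        rw [hgn, hpre_get k hk]
        exact shareRow_witness _ _ v hvxs (List.contains_iff_mem.mp hc)
      exact spidx_nat (pre ++ xs :: rest') k pre.length hkg hnlt hk hshare
    -- F2: the row minimum is minimal in its column
    have F2 : ∀ m, bRowMin d xs = some m → ∀ i',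
        SPidx (pre ++ xs :: rest') i' (pre.length : Int) → m ≤ i' := by
      intro m hm i' hsp'
      obtain ⟨_, hmin⟩ := rowMin_some d xs m hm
      obtain ⟨a', b', ha', hb', rfl, hb'eq, hab', hshare'⟩ := spidx_elim _ _ _ hsp'
      have hb'n : b' = pre.length := by omega
      subst hb'n
      rw [getElem!_pos _ a' ha', getElem!_pos _ pre.length hb', hgn] at hshare'
      obtain ⟨v, hvxs, hvo⟩ := shareRow_elim _ _ hshare'
      have ha'pre : a' < pre.length := hab'
      have hcv : pre[a']!.contains v = true := by
        rw [getElem!_pos _ a' ha'pre, ← hpre_get a' ha'pre]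
        exact List.contains_iff_mem.mpr hvo
      obtain ⟨i₀, hfa, hle⟩ := firstAt_le pre 0 v a' ha'pre hcv
      have := hmin v hvxs i₀ (by rw [hd v]; exact hfa)
      omega
    -- F3: no row minimum means the column is empty
    have F3 : bRowMin d xs = none → ∀ i', ¬ SPidx (pre ++ xs :: rest') i' (pre.length : Int) := by
      intro hm i' hsp'
      obtain ⟨a', b', ha', hb', rfl, hb'eq, hab', hshare'⟩ := spidx_elim _ _ _ hsp'
      have hb'n : b' = pre.length := by omega
      subst hb'n
      rw [getElem!_pos _ a' ha', getElem!_pos _ pre.length hb', hgn] at hshare'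
      obtain ⟨v, hvxs, hvo⟩ := shareRow_elim _ _ hshare'
      have ha'pre : a' < pre.length := hab'
      have hcv : pre[a']!.contains v = true := by
        rw [getElem!_pos _ a' ha'pre, ← hpre_get a' ha'pre]
        exact List.contains_iff_mem.mpr hvo
      obtain ⟨i₀, hfa, _⟩ := firstAt_le pre 0 v a' ha'pre hcv
      have hdn := rowMin_none d xs hm v hvxs
      rw [hd v, hfa] at hdn
      exact absurd hdn (by simp)
    -- the dictionary invariant advances by one row
    have hd' : ∀ v, (bAddRow d ((pre.length : Nat) : Int) xs).get? v = firstAt (pre ++ [xs]) 0 v := by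
      intro v
      rw [bAddRow_get]
      cases hfa : firstAt pre 0 v with
      | some i =>
        rw [hd v, hfa, firstAt_append_some pre xs 0 v i hfa]
        rfl
      | none =>
        rw [hd v, hfa, firstAt_append_none pre xs 0 v hfa]
        cases xs.contains v <;> simp
    have hstep : ∀ best', BInv (pre ++ xs :: rest') (pre ++ [xs]).length best' →
        IsBest (pre ++ xs :: rest') (bScan (bAddRow d ((pre.length : Nat) : Int) xs) best'
          (((pre ++ [xs]).length : Nat) : Int) rest') := by
      intro best' hinv'
      exact ih (pre ++ [xs]) (bAddRow d ((pre.length : Nat) : Int) xs) best' hg' hd' hinv'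
    rw [bScan, ← hlen1]
    have hlen2 : (((pre ++ [xs]).length : Nat) : Int) = (pre.length : Int) + 1 := hlen1
    cases hrm : bRowMin d xs with
    | none =>
      apply hstep
      cases best with
      | none =>
        intro i j hj hsp
        rw [hlen2] at hj
        have hcase : j < (pre.length : Int) ∨ j = (pre.length : Int) := by omega
        rcases hcase with h | rfl
        · exact hinv i j h hsp
        · exact F3 hrm i hsp
      | some bij =>
        obtain ⟨bi, bj⟩ := bij
        refine ⟨hinv.1, by rw [hlen2]; have := hinv.2.1; omega, ?_⟩
        intro i' j' hj' hsp'
        rw [hlen2] at hj'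
        have hcase : j' < (pre.length : Int) ∨ j' = (pre.length : Int) := by omega
        rcases hcase with h | rfl
        · exact hinv.2.2 i' j' h hsp'
        · exact absurd hsp' (F3 hrm i')
    | some m =>
      cases best with
      | none =>
        apply hstep
        refine ⟨F1 m hrm, by rw [hlen2]; omega, ?_⟩
        intro i' j' hj' hsp'
        rw [hlen2] at hj'
        have hcase : j' < (pre.length : Int) ∨ j' = (pre.length : Int) := by omega
        rcases hcase with h | rfl
        · exact absurd hsp' (hinv i' j' h)
        · have := F2 m hrm i' hsp'
          omega
      | some bij =>
        obtain ⟨bi, bj⟩ := bij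
        show IsBest (pre ++ xs :: rest')
          (bScan (bAddRow d ((pre.length : Nat) : Int) xs)
            (if m < bi then some (m, ((pre.length : Nat) : Int)) else some (bi, bj))
            (((pre ++ [xs]).length : Nat) : Int) rest')
        by_cases hlt : m < bi
        · rw [if_pos hlt]
          apply hstep
          refine ⟨F1 m hrm, by rw [hlen2]; omega, ?_⟩
          intro i' j' hj' hsp'
          rw [hlen2] at hj'
          have hcase : j' < (pre.length : Int) ∨ j' = (pre.length : Int) := by omega
          rcases hcase with h | rfl
          · have := hinv.2.2 i' j' h hsp'
            omega
          · have := F2 m hrm i' hsp'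
            omega
        · rw [if_neg hlt]
          apply hstep
          refine ⟨hinv.1, by rw [hlen2]; have := hinv.2.1; omega, ?_⟩
          intro i' j' hj' hsp'
          rw [hlen2] at hj'
          have hcase : j' < (pre.length : Int) ∨ j' = (pre.length : Int) := by omega
          rcases hcase with h | rfl
          · exact hinv.2.2 i' j' h hsp'
          · have h2 := F2 m hrm i' hsp'
            have h3 := hinv.2.1
            omega

theorem bSide_isBest (g : List (List Int)) :
    IsBest g (bScan PySem.Dict.empty none 0 g) := by
  have h := bScan_ind g g [] PySem.Dict.empty none (by simp)
    (by intro v; simp [firstAt, PySem.Dict.get?_empty])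
    (by
      intro i j hj hsp
      obtain ⟨h0, hij, _, _⟩ := hsp
      simp at hj
      omega)
  simpa using h

-- ---------- output assembly ----------

theorem filterOne : ∀ (g : List (List Int)) (s j : Int), s ≤ j →
    ((PySem.List.enumerate g s).filter (fun p => p.1 != j)).map (·.2)
      = g.eraseIdx (j - s).toNat := by
  intro g
  induction g with
  | nil => intro s j _; simp [PySem.List.enumerate_nil]
  | cons x g' ih =>
    intro s j hsj
    rw [PySem.List.enumerate_cons]
    by_cases hs : s = j
    · subst hs
      have hhead : (((s, x) : Int × List Int).1 != s) = false := by simp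
      rw [List.filter_cons, hhead, if_neg (by simp)]
      have hall : (PySem.List.enumerate g' (s + 1)).filter (fun p => p.1 != s)
          = PySem.List.enumerate g' (s + 1) := by
        apply List.filter_eq_self.mpr
        intro p hp
        have := enum_fst_ge g' (s + 1) p hp
        simp
        omega
      rw [hall]
      have h0 : (s - s).toNat = 0 := by omega
      rw [h0, List.eraseIdx_cons_zero]
      exact PySem.List.map_snd_enumerate g' (s + 1)
    · have hslt : s < j := lt_of_le_of_ne hsj hs
      have hhead : (((s, x) : Int × List Int).1 != j) = true := by simp; omega
      rw [List.filter_cons, hhead, if_pos (by simp)]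
      simp only [List.map_cons]
      rw [ih (s + 1) j (by omega)]
      have h1 : (j - s).toNat = (j - (s + 1)).toNat + 1 := by omega
      rw [h1, List.eraseIdx_cons_succ]

theorem filterTwo : ∀ (g : List (List Int)) (s i j : Int), s ≤ i → i < j →
    ((PySem.List.enumerate g s).filter (fun p => p.1 != i && p.1 != j)).map (·.2)
      = (g.eraseIdx (j - s).toNat).eraseIdx (i - s).toNat := by
  intro g
  induction g with
  | nil => intro s i j _ _; simp [PySem.List.enumerate_nil]
  | cons x g' ih =>
    intro s i j hsi hij
    rw [PySem.List.enumerate_cons]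
    by_cases hs : s = i
    · subst hs
      have hhead : (((s, x) : Int × List Int).1 != s && ((s, x) : Int × List Int).1 != j) = false := by
        simp
      rw [List.filter_cons, hhead, if_neg (by simp)]
      have hcongr : (PySem.List.enumerate g' (s + 1)).filter (fun p => p.1 != s && p.1 != j)
          = (PySem.List.enumerate g' (s + 1)).filter (fun p => p.1 != j) := by
        apply List.filter_congr
        intro p hp
        have := enum_fst_ge g' (s + 1) p hp
        have hps : (p.1 != s) = true := by simp; omega
        rw [hps, Bool.true_and]
      rw [hcongr, filterOne g' (s + 1) j (by omega)]
      have h1 : (j - s).toNat = (j - (s + 1)).toNat + 1 := by omega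
      have h2 : (s - s).toNat = 0 := by omega
      rw [h1, h2, List.eraseIdx_cons_succ, List.eraseIdx_cons_zero]
    · have hslt : s < i := lt_of_le_of_ne hsi hs
      have hhead : (((s, x) : Int × List Int).1 != i && ((s, x) : Int × List Int).1 != j) = true := by
        simp
        omega
      rw [List.filter_cons, hhead, if_pos (by simp)]
      simp only [List.map_cons]
      rw [ih (s + 1) i j (by omega) hij]
      have h1 : (j - s).toNat = (j - (s + 1)).toNat + 1 := by omega
      have h2 : (i - s).toNat = (i - (s + 1)).toNat + 1 := by omega
      rw [h1, h2, List.eraseIdx_cons_succ, List.eraseIdx_cons_succ]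

theorem sorted_short (l : List Int) (h : l.length ≤ 1) :
    PySem.List.sorted l (fun x => x) false = l := by
  match l with
  | [] => rfl
  | [x] => rfl
  | x :: y :: t => simp at h

theorem diff_eq (outer inner : List Int) :
    PySem.Set.diff (PySem.Set.ofList outer) (PySem.Set.ofList inner)
      = (PySem.List.dedup outer).filter (fun v => !inner.contains v) := by
  have hunfold : PySem.Set.diff (PySem.Set.ofList outer) (PySem.Set.ofList inner)
      = (PySem.Set.ofList outer).filter (fun x => !(List.contains (PySem.Set.ofList inner) x)) :=
    rfl
  rw [hunfold, PySem.List.dedup_eq_ofList]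
  apply List.filter_congr
  intro x _
  have hcont : List.contains (PySem.Set.ofList inner) x = List.contains inner x := by
    by_cases hmem : x ∈ inner
    · rw [List.contains_iff_mem.mpr hmem,
        List.contains_iff_mem.mpr ((PySem.Set.mem_ofList inner x).mpr hmem)]
    · have h1 : List.contains inner x = false := by
        rw [Bool.eq_false_iff]
        intro hcc
        exact hmem (List.contains_iff_mem.mp hcc)
      have h2 : List.contains (PySem.Set.ofList inner) x = false := by
        rw [Bool.eq_false_iff]
        intro hcc
        exact hmem ((PySem.Set.mem_ofList inner x).mp (List.contains_iff_mem.mp hcc))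
      rw [h1, h2]
  exact congrArg (fun b => !b) hcont

-- ===== VERDICT (by name: the statement is the Claim_ definition above) =====
theorem combine_connected_spec : Claim_equal_combine_connected := by
  intro g _ hpre
  unfold Spec_combine_connected
  have huniq := isBest_unique g _ _ (aSide_isBest g) (bSide_isBest g)
  unfold combine_connected combine_connected_alt
  cases hO : pyAOuter g (PySem.List.enumerate g 0) with
  | none =>
    rw [hO] at huniq
    simp only [Option.map_none] at huniq
    rw [← huniq]
  | some t =>
    obtain ⟨oi, outer, ii, inner⟩ := t
    rw [hO] at huniq
    simp only [Option.map_some] at huniq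
    rw [← huniq]
    have hpw := PySem.List.pairwise_lt_enumerate (xs := g) (s := 0)
    obtain ⟨_, hs⟩ := pyAOuter_props g (PySem.List.enumerate g 0) hpw
    obtain ⟨hmem, hfd, _⟩ := hs oi outer ii inner hO
    rw [pyAInner_eq_find?] at hfd
    have hqmem : (ii, inner) ∈ PySem.List.enumerate g 0 := List.mem_of_find?_eq_some hfd
    have hpred := List.find?_some hfd
    simp only [Bool.and_eq_true, decide_eq_true_eq] at hpred
    obtain ⟨a, ha, hpa⟩ := (mem_E_iff g _).mp hmem
    obtain ⟨b, hb, hqb⟩ := (mem_E_iff g _).mp hqmem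
    have hoi : oi = (a : Int) := congrArg Prod.fst hpa
    have houter : outer = g[a] := congrArg Prod.snd hpa
    have hii : ii = (b : Int) := congrArg Prod.fst hqb
    have hinner : inner = g[b] := congrArg Prod.snd hqb
    have hgo : PySem.List.pyGetD g oi [] = outer := by
      rw [hoi, houter]; exact PySem.List.pyGetD_ofNat g a [] ha
    have hgi : PySem.List.pyGetD g ii [] = inner := by
      rw [hii, hinner]; exact PySem.List.pyGetD_ofNat g b [] hb
    have hkept : ((PySem.List.enumerate g 0).filter (fun p => p.1 != oi && p.1 != ii)).map (·.2)
        = (g.eraseIdx ii.toNat).eraseIdx oi.toNat := by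
      have hf := filterTwo g 0 oi ii (by rw [hoi]; omega) hpred.1
      simpa using hf
    have hshort := hpre (oi, outer) hmem (ii, inner) hqmem hpred.1 hpred.2
    have hsorted : PySem.List.sorted
        (PySem.Set.diff (PySem.Set.ofList outer) (PySem.Set.ofList inner)) (fun x => x) false
        = (PySem.List.dedup outer).filter (fun v => !inner.contains v) := by
      rw [diff_eq]
      exact sorted_short _ hshort
    simp only [hgo, hgi, hkept, hsorted]
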